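-- pv_equiv track=rewrite | github.com/abh2050/docu_scribe_ai | agents/context_agent.py | map_to_soap_sections
-- ===== SOURCE A (Python) =====
-- from typing import Dict, Any, List
--
-- def map_to_soap_sections(classified_segments: List[Dict[str, Any]]) -> Dict[str, List[Dict[str, Any]]]:
--     """Map classified segments to SOAP sections"""
--     soap_mapping = {
--         "subjective": [],
--         "objective": [],
--         "assessment": [],
--         "plan": []
--     }
--
--     for segment in classified_segments:
--         primary = segment["primary_classification"]
--         if primary in soap_mapping:
--             soap_mapping[primary].append(segment)
--         else:
--             # Default to subjective for unclear segments from patients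
--             if segment["speaker"] == "Patient":
--                 soap_mapping["subjective"].append(segment)
--             else:
--                 soap_mapping["assessment"].append(segment)
--
--     return soap_mapping
-- ===== SOURCE B (Python) =====
-- def map_to_soap_sections(classified_segments):
--     """Map classified segments to SOAP sections (per-section scan with a target helper)."""
--     def target(segment):
--         primary = segment["primary_classification"]
--         if primary in ("subjective", "objective", "assessment", "plan"):
--             return primary
--         return "subjective" if segment["speaker"] == "Patient" else "assessment"
--     return {section: [s for s in classified_segments if target(s) == section]
--             for section in ("subjective", "objective", "assessment", "plan")}
-- ===== Notes on version B (the rewrite author's own statement) =====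
-- stated objective: simpler
-- what changed: Replaces the single stateful bucketing pass (four mutable lists updated per segment) by a target(segment) classifier plus one filtering scan of the input per SOAP section, built as a dict comprehension over the fixed key order.
import Mathlib
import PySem

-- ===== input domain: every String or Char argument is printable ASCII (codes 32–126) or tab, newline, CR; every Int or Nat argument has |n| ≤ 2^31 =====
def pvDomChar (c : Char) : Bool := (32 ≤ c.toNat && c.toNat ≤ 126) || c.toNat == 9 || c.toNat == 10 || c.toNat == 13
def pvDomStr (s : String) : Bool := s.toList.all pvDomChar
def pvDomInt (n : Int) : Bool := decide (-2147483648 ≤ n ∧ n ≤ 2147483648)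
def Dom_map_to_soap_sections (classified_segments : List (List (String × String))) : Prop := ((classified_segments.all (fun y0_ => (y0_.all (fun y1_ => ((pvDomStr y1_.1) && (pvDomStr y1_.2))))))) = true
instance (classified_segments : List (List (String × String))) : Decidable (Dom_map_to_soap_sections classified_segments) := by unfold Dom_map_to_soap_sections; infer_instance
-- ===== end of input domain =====

-- B replaces A's single stateful bucketing pass by a target-classifier plus one filtering scan per SOAP section (simpler; same cost class).

-- ===== PORT A =====
-- A's loop over four mutable bucket lists, carried as an explicit 4-tuple accumulator.
def soapLoop : List (List (String × String)) → List (List (String × String)) →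
    List (List (String × String)) → List (List (String × String)) → List (List (String × String)) →
    List (List (String × String)) × List (List (String × String)) × List (List (String × String)) × List (List (String × String))
  | [], s, o, a, p => (s, o, a, p)
  | seg :: rest, s, o, a, p =>
    let primary := (seg.lookup "primary_classification").getD ""
    if primary = "subjective" then soapLoop rest (s ++ [seg]) o a p
    else if primary = "objective" then soapLoop rest s (o ++ [seg]) a p
    else if primary = "assessment" then soapLoop rest s o (a ++ [seg]) p
    else if primary = "plan" then soapLoop rest s o a (p ++ [seg])
    else if (seg.lookup "speaker").getD "" = "Patient" then soapLoop rest (s ++ [seg]) o a p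
    else soapLoop rest s o (a ++ [seg]) p

def map_to_soap_sections (classified_segments : List (List (String × String))) : List (String × List (List (String × String))) :=
  let r := soapLoop classified_segments [] [] [] []
  [("subjective", r.1), ("objective", r.2.1), ("assessment", r.2.2.1), ("plan", r.2.2.2)]

-- ===== PORT B =====
-- B's target(segment) helper.
def soapTarget (seg : List (String × String)) : String :=
  let primary := (seg.lookup "primary_classification").getD ""
  if primary = "subjective" ∨ primary = "objective" ∨ primary = "assessment" ∨ primary = "plan" then primary
  else if (seg.lookup "speaker").getD "" = "Patient" then "subjective" else "assessment"

def map_to_soap_sections_alt (classified_segments : List (List (String × String))) : List (String × List (List (String × String))) :=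
  ["subjective", "objective", "assessment", "plan"].map
    (fun sec => (sec, classified_segments.filter (fun s => soapTarget s == sec)))

-- ===== PRECONDITION & SPEC =====
-- Pre_ excludes exactly the inputs where Python A raises KeyError: a segment missing
-- "primary_classification", or one whose primary is not a SOAP key and which misses "speaker".
def Pre_map_to_soap_sections (classified_segments : List (List (String × String))) : Prop :=
  ∀ seg ∈ classified_segments, (seg.lookup "primary_classification").isSome = true ∧
    ((seg.lookup "primary_classification").getD "" ∉ (["subjective", "objective", "assessment", "plan"] : List String) →
      (seg.lookup "speaker").isSome = true)
instance (classified_segments : List (List (String × String))) : Decidable (Pre_map_to_soap_sections classified_segments) := by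
  unfold Pre_map_to_soap_sections; infer_instance

def pvWitness_map_to_soap_sections : (List (List (String × String))) :=
  [[("primary_classification", "plan")], [("primary_classification", "note"), ("speaker", "Patient")]]

def Spec_map_to_soap_sections (classified_segments : List (List (String × String))) (out : List (String × List (List (String × String)))) : Prop := out = map_to_soap_sections_alt classified_segments
instance (classified_segments : List (List (String × String))) (out : List (String × List (List (String × String)))) : Decidable (Spec_map_to_soap_sections classified_segments out) := by unfold Spec_map_to_soap_sections; infer_instance

-- ===== CLAIM (what is proved, stated in full; the proofs are below) =====
def Claim_equal_map_to_soap_sections : Prop := ∀ (classified_segments : List (List (String × String))), Dom_map_to_soap_sections classified_segments → Pre_map_to_soap_sections classified_segments → Spec_map_to_soap_sections classified_segments (map_to_soap_sections classified_segments)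

-- ===== LEMMAS AND PROOFS =====

-- The bucketing loop equals filtering by the target classifier, for any starting buckets.
theorem soapLoop_eq_filter (segs : List (List (String × String)))
    (s o a p : List (List (String × String))) :
    soapLoop segs s o a p =
      (s ++ segs.filter (fun x => soapTarget x == "subjective"),
       o ++ segs.filter (fun x => soapTarget x == "objective"),
       a ++ segs.filter (fun x => soapTarget x == "assessment"),
       p ++ segs.filter (fun x => soapTarget x == "plan")) := by
  induction segs generalizing s o a p with
  | nil => simp [soapLoop]
  | cons seg rest ih =>
    simp only [soapLoop]
    by_cases h1 : (seg.lookup "primary_classification").getD "" = "subjective"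
    · simp [h1, ih, soapTarget]
    · by_cases h2 : (seg.lookup "primary_classification").getD "" = "objective"
      · simp [h2, ih, soapTarget]
      · by_cases h3 : (seg.lookup "primary_classification").getD "" = "assessment"
        · simp [h3, ih, soapTarget]
        · by_cases h4 : (seg.lookup "primary_classification").getD "" = "plan"
          · simp [h4, ih, soapTarget]
          · by_cases h5 : (seg.lookup "speaker").getD "" = "Patient"
            · simp [h1, h2, h3, h4, h5, ih, soapTarget]
            · simp [h1, h2, h3, h4, h5, ih, soapTarget]

-- ===== VERDICT (by name: the statement is the Claim_ definition above) =====
theorem map_to_soap_sections_spec : Claim_equal_map_to_soap_sections := by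
  intro segs _ _
  unfold Spec_map_to_soap_sections map_to_soap_sections map_to_soap_sections_alt
  simp [soapLoop_eq_filter]
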